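-- pv_equiv track=rewrite | github.com/Esha034/Human-Emotion-Detection-App | app/app.py | handle_negation
-- ===== SOURCE A (Python) =====
-- NEGATION_WINDOW = 3
--
-- def handle_negation(text: str, window: int = NEGATION_WINDOW) -> str:
--     words = text.split()
--     negators = {"not", "no", "never", "n't"}
--     result, negate_count = [], 0
--
--     for word in words:
--         if word in negators:
--             negate_count = window
--             result.append(word)
--         elif negate_count > 0:
--             result.append(f"NOT_{word}")
--             negate_count -= 1
--         else:
--             result.append(word)
--
--     return " ".join(result)
-- ===== SOURCE B (Python) =====
-- NEGATION_WINDOW = 3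
--
-- def handle_negation(text: str, window: int = NEGATION_WINDOW) -> str:
--     """Split the word list into segments at negator words; the leading segment is
--     emitted untouched, and in every later segment (which starts with its negator)
--     the first `window` following words get the NOT_ prefix."""
--     negators = {"not", "no", "never", "n't"}
--     words = text.split()
--     groups, cur = [], []          # groups[0] = words before the first negator
--     for w in words:
--         if w in negators:
--             groups.append(cur)
--             cur = [w]
--         else:
--             cur.append(w)
--     groups.append(cur)
--     out = list(groups[0])
--     for g in groups[1:]:
--         out.append(g[0])
--         out.extend(("NOT_" + w) if k < window else w for k, w in enumerate(g[1:]))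
--     return " ".join(out)
-- ===== Notes on version B (the rewrite author's own statement) =====
-- stated objective: alternative
-- what changed: Replaces A's single pass with a running count-down state by a split-into-segments decomposition: the word list is split at negator words, the leading segment is emitted untouched, and each later segment (negator plus its followers) tags its first `window` followers via enumerate.
import Mathlib
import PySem

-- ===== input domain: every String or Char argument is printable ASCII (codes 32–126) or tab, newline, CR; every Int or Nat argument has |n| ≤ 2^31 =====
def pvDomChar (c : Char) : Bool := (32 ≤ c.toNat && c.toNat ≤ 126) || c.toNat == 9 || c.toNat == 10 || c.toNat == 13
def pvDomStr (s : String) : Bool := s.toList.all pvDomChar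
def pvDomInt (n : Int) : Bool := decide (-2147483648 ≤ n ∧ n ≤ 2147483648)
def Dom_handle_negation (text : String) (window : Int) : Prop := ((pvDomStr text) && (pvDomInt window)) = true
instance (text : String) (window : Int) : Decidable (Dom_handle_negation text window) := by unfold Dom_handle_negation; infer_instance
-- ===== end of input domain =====

-- B replaces A's running count-down state by a split-into-segments decomposition
-- (split the word list at negators, tag the first `window` words of each later
-- segment with enumerate); objective: alternative decomposition, same cost.

-- ===== PORT A =====
def pvNegators : PySem.Set String := PySem.Set.ofList ["not", "no", "never", "n't"]

def handle_negation (text : String) (window : Int) : String :=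
  let words := PySem.Str.split₀ text
  let st := words.foldl (fun (st : List String × Int) word =>
      if PySem.Set.contains pvNegators word then (st.1 ++ [word], window)
      else if st.2 > 0 then (st.1 ++ ["NOT_" ++ word], st.2 - 1)
      else (st.1 ++ [word], st.2)) ([], 0)
  PySem.Str.join " " st.1

-- ===== PORT B =====
def handle_negation_alt (text : String) (window : Int) : String :=
  let words := PySem.Str.split₀ text
  let gc := words.foldl (fun (st : List (List String) × List String) w =>
      if PySem.Set.contains pvNegators w then (st.1 ++ [st.2], [w])
      else (st.1, st.2 ++ [w])) ([], [])
  let groups := gc.1 ++ [gc.2]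
  let out := (PySem.List.slice groups (some 1) none).foldl (fun acc g =>
      (acc ++ [g.headD ""]) ++
        (PySem.List.enumerate g.tail 0).map
          (fun p => if p.1 < window then "NOT_" ++ p.2 else p.2))
      (PySem.List.pyGetD groups 0 [])
  PySem.Str.join " " out

-- ===== PRECONDITION & SPEC =====
def Spec_handle_negation (text : String) (window : Int) (out : String) : Prop := out = handle_negation_alt text window
instance (text : String) (window : Int) (out : String) : Decidable (Spec_handle_negation text window out) := by unfold Spec_handle_negation; infer_instance

-- ===== CLAIM (what is proved, stated in full; the proofs are below) =====
def Claim_equal_handle_negation : Prop := ∀ (text : String) (window : Int), Dom_handle_negation text window → Spec_handle_negation text window (handle_negation text window)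

-- ===== LEMMAS AND PROOFS =====

-- membership in the negator set, shared shorthand for the proofs
def pvIsNeg (w : String) : Bool := PySem.Set.contains pvNegators w

-- A's loop as a structural recursion on the word list carrying the countdown c
def pvGoA (window : Int) : Int → List String → List String
  | _, [] => []
  | c, w :: ws =>
    if pvIsNeg w then w :: pvGoA window window ws
    else if c > 0 then ("NOT_" ++ w) :: pvGoA window (c - 1) ws
    else w :: pvGoA window c ws

-- B's splitter as a structural recursion: (leading segment, later segments)
def pvSplitG : List String → List String × List (List String)
  | [] => ([], [])
  | w :: ws =>
    let r := pvSplitG ws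
    if pvIsNeg w then ([], (w :: r.1) :: r.2) else (w :: r.1, r.2)

-- first-c tagging of a negator-free run, and the countdown left afterwards
def pvTagC : Int → List String → List String
  | _, [] => []
  | c, w :: t => if c > 0 then ("NOT_" ++ w) :: pvTagC (c - 1) t else w :: pvTagC c t

def pvCAfter : Int → List String → Int
  | c, [] => c
  | c, _ :: t => if c > 0 then pvCAfter (c - 1) t else pvCAfter c t

lemma pvA_fold (window : Int) (ws : List String) (acc : List String) (c : Int) :
    (ws.foldl (fun (st : List String × Int) word =>
      if PySem.Set.contains pvNegators word then (st.1 ++ [word], window)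
      else if st.2 > 0 then (st.1 ++ ["NOT_" ++ word], st.2 - 1)
      else (st.1 ++ [word], st.2)) (acc, c)).1 = acc ++ pvGoA window c ws := by
  induction ws generalizing acc c with
  | nil => simp [pvGoA]
  | cons w ws ih =>
    rw [List.foldl_cons]
    by_cases h : pvIsNeg w = true
    · have h' : PySem.Set.contains pvNegators w = true := h
      rw [if_pos h', ih, pvGoA, if_pos h]
      simp
    · have h' : ¬ PySem.Set.contains pvNegators w = true := h
      rw [if_neg h']
      by_cases hc : c > 0
      · rw [if_pos hc, ih, pvGoA, if_neg h, if_pos hc]; simp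
      · rw [if_neg hc, ih, pvGoA, if_neg h, if_neg hc]; simp

lemma pvB_fold (ws : List String) (gs : List (List String)) (cur : List String) :
    (ws.foldl (fun (st : List (List String) × List String) w =>
        if PySem.Set.contains pvNegators w then (st.1 ++ [st.2], [w])
        else (st.1, st.2 ++ [w])) (gs, cur)).1 ++
      [(ws.foldl (fun (st : List (List String) × List String) w =>
        if PySem.Set.contains pvNegators w then (st.1 ++ [st.2], [w])
        else (st.1, st.2 ++ [w])) (gs, cur)).2] =
    gs ++ (cur ++ (pvSplitG ws).1) :: (pvSplitG ws).2 := by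
  induction ws generalizing gs cur with
  | nil => simp [pvSplitG]
  | cons w ws ih =>
    rw [List.foldl_cons]
    by_cases h : pvIsNeg w = true
    · have h' : PySem.Set.contains pvNegators w = true := h
      rw [if_pos h', ih]
      simp [pvSplitG, h]
    · have h' : ¬ PySem.Set.contains pvNegators w = true := h
      rw [Bool.not_eq_true] at h
      rw [if_neg h', ih]
      simp [pvSplitG, h]

lemma pvSplitG_flatten (ws : List String) :
    (pvSplitG ws).1 ++ (pvSplitG ws).2.flatten = ws := by
  induction ws with
  | nil => simp [pvSplitG]
  | cons w ws ih =>
    by_cases h : pvIsNeg w = true <;> simp [pvSplitG, h, ih]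

lemma pvSplitG_lead (ws : List String) : ∀ w ∈ (pvSplitG ws).1, pvIsNeg w = false := by
  induction ws with
  | nil => simp [pvSplitG]
  | cons w ws ih =>
    by_cases h : pvIsNeg w = true
    · simp [pvSplitG, h]
    · rw [Bool.not_eq_true] at h
      simp only [pvSplitG, h, Bool.false_eq_true, if_neg, not_false_iff]
      intro x hx
      rcases List.mem_cons.mp hx with rfl | hx'
      · exact h
      · exact ih x hx'

lemma pvSplitG_segs (ws : List String) :
    ∀ g ∈ (pvSplitG ws).2, ∃ h t, g = h :: t ∧ pvIsNeg h = true ∧ ∀ w ∈ t, pvIsNeg w = false := by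
  induction ws with
  | nil => simp [pvSplitG]
  | cons w ws ih =>
    by_cases h : pvIsNeg w = true
    · simp only [pvSplitG, h, if_pos]
      intro g hg
      rcases List.mem_cons.mp hg with rfl | hg'
      · exact ⟨w, (pvSplitG ws).1, rfl, h, pvSplitG_lead ws⟩
      · exact ih g hg'
    · rw [Bool.not_eq_true] at h
      simp only [pvSplitG, h, Bool.false_eq_true, if_neg, not_false_iff]
      exact ih

-- c = 0: a negator-free prefix is emitted untouched and the countdown stays 0
lemma pvGoA_lead (window : Int) (lead rest : List String)
    (h : ∀ w ∈ lead, pvIsNeg w = false) :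
    pvGoA window 0 (lead ++ rest) = lead ++ pvGoA window 0 rest := by
  induction lead with
  | nil => simp
  | cons w l ih =>
    have hw := h w (by simp)
    simp [pvGoA, hw, ih fun x hx => h x (by simp [hx])]

-- on a negator-free run A tags the first c words and leaves countdown pvCAfter
lemma pvGoA_run (window c : Int) (t rest : List String)
    (h : ∀ w ∈ t, pvIsNeg w = false) :
    pvGoA window c (t ++ rest) = pvTagC c t ++ pvGoA window (pvCAfter c t) rest := by
  induction t generalizing c with
  | nil => simp [pvTagC, pvCAfter]
  | cons w t ih =>
    have hw := h w (by simp)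
    have ih' := fun c => ih c fun x hx => h x (by simp [hx])
    by_cases hc : c > 0 <;> simp [pvGoA, pvTagC, pvCAfter, hw, hc, ih']

lemma pvTagC_nonpos (c : Int) (t : List String) (h : c ≤ 0) : pvTagC c t = t := by
  induction t with
  | nil => rfl
  | cons w t ih => simp [pvTagC, not_lt.mpr h, ih]

lemma pvEnumMap_nonpos (window : Int) (t : List String) (s : Int) (h : window ≤ s) :
    (PySem.List.enumerate t s).map
      (fun p => if p.1 < window then "NOT_" ++ p.2 else p.2) = t := by
  induction t generalizing s with
  | nil => simp [PySem.List.enumerate]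
  | cons w t ih =>
    rw [PySem.List.enumerate_cons]
    simp only [List.map_cons, if_neg (not_lt.mpr h)]
    rw [ih (s + 1) (by omega)]

-- countdown tagging = enumerate tagging
lemma pvTagC_enum (t : List String) (c s : Int) :
    (PySem.List.enumerate t s).map
      (fun p => if p.1 < c + s then "NOT_" ++ p.2 else p.2) = pvTagC c t := by
  induction t generalizing c s with
  | nil => simp [PySem.List.enumerate, pvTagC]
  | cons w t ih =>
    rw [PySem.List.enumerate_cons]
    by_cases hc : c > 0
    · simp only [List.map_cons, if_pos (by omega : s < c + s), pvTagC, if_pos hc]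
      have := ih (c - 1) (s + 1)
      rw [show c - 1 + (s + 1) = c + s by ring] at this
      rw [this]
    · simp only [List.map_cons, if_neg (by omega : ¬ s < c + s), pvTagC, if_neg hc]
      rw [pvEnumMap_nonpos (c + s) t (s + 1) (by omega),
          pvTagC_nonpos c t (by omega)]

-- rendering all later segments: independent of the incoming countdown
lemma pvGoA_segs (window : Int) (segs : List (List String))
    (hseg : ∀ g ∈ segs, ∃ h t, g = h :: t ∧ pvIsNeg h = true ∧ ∀ w ∈ t, pvIsNeg w = false) :
    ∀ c, pvGoA window c segs.flatten =
      segs.flatMap (fun g => g.headD "" ::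
        (PySem.List.enumerate g.tail 0).map
          (fun p => if p.1 < window then "NOT_" ++ p.2 else p.2)) := by
  induction segs with
  | nil => intro c; simp [pvGoA]
  | cons g segs ih =>
    intro c
    obtain ⟨h, t, rfl, hh, ht⟩ := hseg g (by simp)
    have ih' := ih fun g hg => hseg g (by simp [hg])
    simp only [List.flatten_cons, List.cons_append, List.flatMap_cons, List.headD_cons,
      List.tail_cons]
    rw [pvGoA, if_pos hh, pvGoA_run window window t segs.flatten ht, ih' _]
    have henum := pvTagC_enum t window 0
    rw [show window + 0 = window by ring] at henum
    simp [henum]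

-- ===== VERDICT (by name: the statement is the Claim_ definition above) =====
theorem handle_negation_spec : Claim_equal_handle_negation := by
  intro text window _
  unfold Spec_handle_negation handle_negation handle_negation_alt
  simp only []
  set words := PySem.Str.split₀ text with hw
  rw [pvA_fold window words [] 0]
  have hB := pvB_fold words [] []
  simp only [List.nil_append] at hB
  rw [hB, PySem.List.slice_from_one]
  simp only [List.tail_cons]
  have hstep : (fun (acc : List String) (g : List String) =>
      (acc ++ [g.headD ""]) ++
        (PySem.List.enumerate g.tail 0).map
          (fun p => if p.1 < window then "NOT_" ++ p.2 else p.2)) =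
      (fun acc g => acc ++ (g.headD "" ::
        (PySem.List.enumerate g.tail 0).map
          (fun p => if p.1 < window then "NOT_" ++ p.2 else p.2))) := by
    funext acc g; simp
  rw [hstep, PySem.List.foldl_append_eq_flatMap]
  have hget : PySem.List.pyGetD ((pvSplitG words).1 :: (pvSplitG words).2) 0 [] =
      (pvSplitG words).1 := by
    simp [PySem.List.pyGetD, PySem.List.pyIdx?, PySem.List.pyGet?]
  rw [hget]
  congr 1
  calc pvGoA window 0 words
      = pvGoA window 0 ((pvSplitG words).1 ++ (pvSplitG words).2.flatten) := by
        rw [pvSplitG_flatten]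
    _ = (pvSplitG words).1 ++ pvGoA window 0 (pvSplitG words).2.flatten := by
        exact pvGoA_lead window _ _ (pvSplitG_lead words)
    _ = _ := by rw [pvGoA_segs window _ (pvSplitG_segs words) 0]
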